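-- pv_equiv track=rewrite | github.com/HoeZhiWan/mcc-2023 | Sum^k/Sum^k_v3.py | subsetSums
-- ===== SOURCE A (Python) =====
-- def subsetSums(nums, n, k):
--     # Initialize a dictionary to store the frequency of subset sums
--     freq = {0: 1}
--     mod = 998244353
--
--     # Iterate over each number in the array
--     for num in nums:
--         # Create a copy of the current state of the dictionary
--         temp = freq.copy()
--         # For each sum in the dictionary, add the current number and update the frequency
--         for sum in freq:
--             new_sum = sum + num
--             if new_sum in temp:
--                 temp[new_sum] += freq[sum]
--             else:
--                 temp[new_sum] = freq[sum]
--         # Update the original dictionary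
--         freq = temp
--
--     # Calculate the sum of powers
--     result = 0
--     for sum in freq:
--         result = (result + pow(sum, k, mod) * freq[sum]) % mod
--
--     return result
-- ===== SOURCE B (Python) =====
-- def subsetSums(nums, n, k):
--     mod = 998244353
--
--     # Binary include/exclude recursion over the remaining elements: visit every
--     # one of the 2^len(nums) subsets directly, carrying the running sum, and add
--     # pow(sum, k, mod) at each leaf.  No frequency table of subset sums at all.
--     def go(rest, acc):
--         if not rest:
--             return pow(acc, k, mod)
--         return (go(rest[1:], acc) + go(rest[1:], acc + rest[0])) % mod
--
--     return go(nums, 0)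
-- ===== Notes on version B (the rewrite author's own statement) =====
-- stated objective: alternative
-- what changed: B drops A's frequency-dictionary DP over distinct subset sums entirely and instead enumerates every subset by a binary include/exclude recursion, carrying the running sum and adding pow(sum,k,mod) at each leaf.
import Mathlib
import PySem

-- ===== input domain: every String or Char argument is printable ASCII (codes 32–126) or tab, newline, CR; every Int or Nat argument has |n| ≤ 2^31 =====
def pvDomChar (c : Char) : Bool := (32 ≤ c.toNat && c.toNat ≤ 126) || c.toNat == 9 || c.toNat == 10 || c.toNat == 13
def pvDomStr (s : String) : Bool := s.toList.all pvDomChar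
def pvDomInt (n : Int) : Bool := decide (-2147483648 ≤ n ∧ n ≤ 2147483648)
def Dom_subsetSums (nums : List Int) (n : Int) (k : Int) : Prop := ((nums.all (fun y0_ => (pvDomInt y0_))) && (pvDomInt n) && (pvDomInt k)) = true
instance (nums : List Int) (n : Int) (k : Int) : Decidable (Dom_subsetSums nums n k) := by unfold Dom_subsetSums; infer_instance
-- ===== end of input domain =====

-- B replaces A's frequency-dictionary DP over distinct subset sums by a binary
-- include/exclude recursion visiting every subset directly (alternative
-- algorithm, exponential like A); return values agree for k ≥ 0 (A raises for k < 0).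

-- ===== PORT A =====
-- loop body of A's `for num in nums`; `freq[sum]` is a lookup of a present key, ported as getD
def aStep (freq : PySem.Dict Int Int) (num : Int) : PySem.Dict Int Int :=
  freq.keys.foldl (fun temp s =>
    let newSum := s + num
    if temp.contains newSum then temp.insert newSum (temp.getD newSum 0 + freq.getD s 0)
    else temp.insert newSum (freq.getD s 0)) freq

-- `pow(sum, k, mod)` = PySem.Int.powMod with exponent k.toNat, exact for 0 ≤ k (Pre_)
def subsetSums (nums : List Int) (n : Int) (k : Int) : Int :=
  let freq := nums.foldl aStep ((PySem.Dict.empty : PySem.Dict Int Int).insert 0 1)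
  freq.keys.foldl (fun result s =>
    PySem.Int.mod (result + PySem.Int.powMod s k.toNat 998244353 * freq.getD s 0) 998244353) 0

-- ===== PORT B =====
-- Source B's `go(rest, acc)`: binary include/exclude recursion on the remaining list
def bGo (k : Int) : List Int → Int → Int
  | [], acc => PySem.Int.powMod acc k.toNat 998244353
  | x :: rest, acc =>
    PySem.Int.mod (bGo k rest acc + bGo k rest (acc + x)) 998244353

def subsetSums_alt (nums : List Int) (n : Int) (k : Int) : Int := bGo k nums 0

-- ===== PRECONDITION & SPEC =====
-- A raises ValueError when k < 0 (pow(0, k, mod) with the always-present key 0 asks for a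
-- modular inverse of 0); those inputs are excluded — on everything else A returns normally.
def Pre_subsetSums (nums : List Int) (n : Int) (k : Int) : Prop := 0 ≤ k
instance (nums : List Int) (n : Int) (k : Int) : Decidable (Pre_subsetSums nums n k) := by unfold Pre_subsetSums; infer_instance
def pvWitness_subsetSums : List Int × Int × Int := ([1, 2], 2, 3)

def Spec_subsetSums (nums : List Int) (n : Int) (k : Int) (out : Int) : Prop := out = subsetSums_alt nums n k
instance (nums : List Int) (n : Int) (k : Int) (out : Int) : Decidable (Spec_subsetSums nums n k out) := by unfold Spec_subsetSums; infer_instance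

-- ===== CLAIM (what is proved, stated in full; the proofs are below) =====
def Claim_equal_subsetSums : Prop := ∀ (nums : List Int) (n : Int) (k : Int), Dom_subsetSums nums n k → Pre_subsetSums nums n k → Spec_subsetSums nums n k (subsetSums nums n k)

-- ===== LEMMAS AND PROOFS =====

-- the list of all subset sums (with multiplicity) and its counting function
def ssList : List Int → List Int
  | [] => [0]
  | x :: l => ssList l ++ (ssList l).map (· + x)

def cnt (l : List Int) (s : Int) : Int := ((ssList l).count s : Int)

lemma cnt_nil (s : Int) : cnt [] s = if s = 0 then 1 else 0 := by
  by_cases h : s = 0 <;> simp [cnt, ssList, h, List.count_cons] <;> omega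

lemma cnt_cons (x : Int) (l : List Int) (s : Int) :
    cnt (x :: l) s = cnt l s + cnt l (s - x) := by
  show (((ssList l ++ (ssList l).map (· + x)).count s : Nat) : Int) = _
  rw [List.count_append]
  have h := List.count_map_of_injective (ssList l) (· + x)
    (fun a b hab => by simpa using hab) (s - x)
  simp only [sub_add_cancel] at h
  rw [h]
  push_cast
  rfl

lemma cnt_mem_ne (l : List Int) (t : Int) (ht : t ∈ ssList l) : cnt l t ≠ 0 := by
  have := List.count_pos_iff.2 ht
  simp only [cnt]
  exact_mod_cast Nat.pos_iff_ne_zero.1 this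

-- generic: getD after a fold of accumulate-inserts
lemma foldl_insacc_getD {α : Type} (K : List α) (kf vf : α → Int) :
    ∀ (t : PySem.Dict Int Int) (s : Int),
    (K.foldl (fun t x => t.insert (kf x) (t.getD (kf x) 0 + vf x)) t).getD s 0
      = t.getD s 0 + ((K.filter (fun x => kf x == s)).map vf).sum := by
  induction K with
  | nil => intro t s; simp
  | cons a K ih =>
    intro t s
    simp only [List.foldl_cons, List.filter_cons]
    rw [ih]
    by_cases h : kf a = s
    · simp only [h, BEq.rfl, if_true, List.map_cons, List.sum_cons,
        PySem.Dict.getD_insert]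
      ring
    · have hb : (kf a == s) = false := by simpa using h
      rw [hb]
      simp only [Bool.false_eq_true, if_false, PySem.Dict.getD_insert]
      rw [if_neg (fun hs => h hs.symm)]

lemma filter_eq_sum (K : List Int) (hnd : K.Nodup) (x : Int) (vf : Int → Int) :
    ((K.filter (fun t => t == x)).map vf).sum = if x ∈ K then vf x else 0 := by
  induction K with
  | nil => simp
  | cons a K ih =>
    rcases List.nodup_cons.1 hnd with ⟨ha, hK⟩
    by_cases h : a = x
    · subst h
      have hfil : K.filter (fun t => t == a) = [] := by
        rw [List.filter_eq_nil_iff]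
        intro t ht
        simp only [beq_iff_eq]
        exact fun e => ha (e ▸ ht)
      simp [hfil]
    · have hb : (a == x) = false := by simpa using h
      have h' : x ≠ a := fun e => h e.symm
      have hmem : (x ∈ a :: K) = (x ∈ K) := by simp [List.mem_cons, h']
      simp only [List.filter_cons, hb, Bool.false_eq_true, if_false, ih hK, hmem]

lemma aStep_eq (freq : PySem.Dict Int Int) (num : Int) :
    aStep freq num
      = freq.keys.foldl (fun t s => t.insert (s + num) (t.getD (s + num) 0 + freq.getD s 0)) freq := by
  unfold aStep
  congr 1
  funext t s
  by_cases h : t.contains (s + num)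
  · simp [h]
  · have h' : t.contains (s + num) = false := by simpa using h
    simp [h', PySem.Dict.getD_of_not_contains _ _ h']

lemma not_contains_of_not_mem (d : PySem.Dict Int Int) (x : Int) (h : x ∉ d.keys) :
    d.contains x = false := by
  cases hc : d.contains x
  · rfl
  · exact absurd ((PySem.Dict.contains_iff_mem_keys d x).1 hc) h

lemma mem_keys_of_getD_ne (d : PySem.Dict Int Int) (t : Int) (h : d.getD t 0 ≠ 0) :
    t ∈ d.keys := by
  by_contra hm
  exact h (PySem.Dict.getD_of_not_contains d 0 (not_contains_of_not_mem d t hm))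

lemma aStep_getD (d : PySem.Dict Int Int) (num : Int) (hnd : d.keys.Nodup) (s : Int) :
    (aStep d num).getD s 0 = d.getD s 0 + d.getD (s - num) 0 := by
  rw [aStep_eq, foldl_insacc_getD d.keys (fun t => t + num) (fun t => d.getD t 0) d s]
  congr 1
  have hpred : ∀ t ∈ d.keys, (t + num == s) = (t == s - num) := by
    intro t _
    by_cases h : t + num = s
    · have : t = s - num := by omega
      simp [h, this]
    · have : t ≠ s - num := by omega
      simp [h, this]
  rw [List.filter_congr hpred, filter_eq_sum d.keys hnd (s - num) (fun t => d.getD t 0)]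
  by_cases hm : s - num ∈ d.keys
  · simp [hm]
  · rw [if_neg hm,
      PySem.Dict.getD_of_not_contains d 0 (not_contains_of_not_mem d _ hm)]

lemma aStep_nodup (d : PySem.Dict Int Int) (num : Int) (hnd : d.keys.Nodup) :
    (aStep d num).keys.Nodup := by
  rw [aStep_eq]
  exact PySem.Dict.nodup_keys_foldl_insert_key d.keys (fun t => t + num)
    (fun t x => t.getD (x + num) 0 + d.getD x 0) d hnd

-- the count transformation A's loop performs, as pure functions
def pCnt : List Int → (Int → Int) → Int → Int
  | [], c, s => c s
  | x :: l, c, s => pCnt l (fun t => c t + c (t - x)) s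

lemma aLoop_nodup (nums : List Int) :
    ∀ d : PySem.Dict Int Int, d.keys.Nodup → (nums.foldl aStep d).keys.Nodup := by
  induction nums with
  | nil => intro d h; exact h
  | cons x l ih => intro d h; exact ih (aStep d x) (aStep_nodup d x h)

lemma aLoop_getD (nums : List Int) :
    ∀ d : PySem.Dict Int Int, d.keys.Nodup → ∀ s,
    (nums.foldl aStep d).getD s 0 = pCnt nums (fun t => d.getD t 0) s := by
  induction nums with
  | nil => intro d _ s; rfl
  | cons x l ih =>
    intro d hnd s
    simp only [List.foldl_cons, pCnt]
    rw [ih (aStep d x) (aStep_nodup d x hnd) s]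
    congr 1
    funext t
    exact aStep_getD d x hnd t

lemma pCnt_add : ∀ (l : List Int) (c₁ c₂ : Int → Int) (s : Int),
    pCnt l (fun t => c₁ t + c₂ t) s = pCnt l c₁ s + pCnt l c₂ s := by
  intro l
  induction l with
  | nil => intro c₁ c₂ s; rfl
  | cons x l ih =>
    intro c₁ c₂ s
    show pCnt l (fun t => (c₁ t + c₂ t) + (c₁ (t - x) + c₂ (t - x))) s = _
    have : (fun t => (c₁ t + c₂ t) + (c₁ (t - x) + c₂ (t - x)))
        = (fun t => (c₁ t + c₁ (t - x)) + (c₂ t + c₂ (t - x))) := by funext t; ring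
    rw [this, ih]
    rfl

lemma pCnt_shift : ∀ (l : List Int) (c : Int → Int) (x s : Int),
    pCnt l (fun t => c (t - x)) s = pCnt l c (s - x) := by
  intro l
  induction l with
  | nil => intro c x s; rfl
  | cons y l ih =>
    intro c x s
    show pCnt l (fun t => c (t - x) + c (t - y - x)) s = pCnt l (fun t => c t + c (t - y)) (s - x)
    have : (fun t => c (t - x) + c (t - y - x))
        = (fun t => (fun u => c u + c (u - y)) (t - x)) := by
      funext t
      have h : t - y - x = t - x - y := by ring
      simp only [h]
    rw [this, ih (fun u => c u + c (u - y)) x s]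

lemma pCnt_cnt : ∀ (l : List Int) (s : Int),
    pCnt l (fun t => if t = 0 then (1 : Int) else 0) s = cnt l s := by
  intro l
  induction l with
  | nil => intro s; rw [cnt_nil]; rfl
  | cons x l ih =>
    intro s
    show pCnt l (fun t => (if t = 0 then (1 : Int) else 0) + (if t - x = 0 then (1 : Int) else 0)) s
        = cnt (x :: l) s
    rw [pCnt_add l (fun t => if t = 0 then (1 : Int) else 0)
      (fun t => if t - x = 0 then (1 : Int) else 0) s]
    have hsh := pCnt_shift l (fun t => if t = 0 then (1 : Int) else 0) x s
    simp only [] at hsh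
    rw [hsh, ih, ih, cnt_cons]

lemma d0_getD (s : Int) :
    ((PySem.Dict.empty : PySem.Dict Int Int).insert 0 1).getD s 0
      = if s = 0 then 1 else 0 := by
  rw [PySem.Dict.getD_insert]
  simp [PySem.Dict.getD_empty]

lemma d0_nodup : ((PySem.Dict.empty : PySem.Dict Int Int).insert 0 1).keys.Nodup :=
  PySem.Dict.nodup_keys_insert _ _ _ PySem.Dict.nodup_keys_empty

lemma A_dict_getD (nums : List Int) (s : Int) :
    (nums.foldl aStep ((PySem.Dict.empty : PySem.Dict Int Int).insert 0 1)).getD s 0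
      = cnt nums s := by
  rw [aLoop_getD nums _ d0_nodup s]
  have : (fun t => ((PySem.Dict.empty : PySem.Dict Int Int).insert 0 1).getD t 0)
      = (fun t => if t = 0 then (1 : Int) else 0) := by funext t; exact d0_getD t
  rw [this, pCnt_cnt]

-- counting: a sum over a nodup key list covering L, weighted by multiplicities,
-- is the sum over L itself
lemma sum_ite_mem (K : List Int) (g : Int → Int) (t : Int) (hnd : K.Nodup) (ht : t ∈ K) :
    (K.map (fun k => if k = t then g k else 0)).sum = g t := by
  induction K with
  | nil => cases ht
  | cons a K ih =>
    rcases List.nodup_cons.1 hnd with ⟨ha, hK⟩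
    by_cases h : a = t
    · subst h
      have hz : ∀ y ∈ K.map (fun k => if k = a then g k else 0), y = 0 := by
        intro y hy
        obtain ⟨kk, hk, rfl⟩ := List.mem_map.1 hy
        have : kk ≠ a := fun e => ha (e ▸ hk)
        simp [this]
      simp [List.sum_eq_zero hz]
    · have ht' : t ∈ K := by
        rcases List.mem_cons.1 ht with h' | h'
        · exact absurd h'.symm h
        · exact h'
      simp [h, ih hK ht']

lemma count_weighted_sum : ∀ (L K : List Int) (g : Int → Int), K.Nodup →
    (∀ t ∈ L, t ∈ K) →
    (K.map (fun k => (L.count k : Int) * g k)).sum = (L.map g).sum := by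
  intro L
  induction L with
  | nil => intro K g _ _; simp
  | cons a L ih =>
    intro K g hnd hsub
    have hmk : (fun k => (((a :: L).count k : Nat) : Int) * g k)
        = fun k => ((L.count k : Nat) : Int) * g k + (if k = a then g k else 0) := by
      funext kk
      rw [List.count_cons]
      by_cases h : a = kk
      · subst h; simp; ring
      · have h' : kk ≠ a := fun e => h e.symm
        simp [h', Ne.symm h']
    rw [hmk, PySem.List.sum_map_add_int,
      ih K g hnd (fun t ht => hsub t (List.mem_cons_of_mem _ ht)),
      sum_ite_mem K g a hnd (hsub a List.mem_cons_self)]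
    simp [List.map_cons]; ring

lemma modfold (M : Int) (f : Int → Int) :
    ∀ (K : List Int) (r : Int),
    K.foldl (fun r s => (r + f s) % M) (r % M) = (r + (K.map f).sum) % M := by
  intro K
  induction K with
  | nil => intro r; simp
  | cons a K ih =>
    intro r
    simp only [List.foldl_cons, List.map_cons, List.sum_cons]
    rw [Int.emod_add_emod, ih (r + f a)]
    ring_nf

lemma final_sum_eq (K : List Int) (hnd : K.Nodup) (nums : List Int)
    (hsub : ∀ t ∈ ssList nums, t ∈ K) (pw : Int → Int) :
    (K.map (fun s => pw s * cnt nums s)).sum = ((ssList nums).map pw).sum := by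
  rw [← count_weighted_sum (ssList nums) K pw hnd hsub]
  apply congrArg
  apply List.map_congr_left
  intro kk _
  show pw kk * cnt nums kk = cnt nums kk * pw kk
  ring

lemma A_val (nums : List Int) (n k : Int) :
    subsetSums nums n k
      = ((nums.foldl aStep ((PySem.Dict.empty : PySem.Dict Int Int).insert 0 1)).keys.map
          (fun s => PySem.Int.powMod s k.toNat 998244353 * cnt nums s)).sum % 998244353 := by
  show (nums.foldl aStep ((PySem.Dict.empty : PySem.Dict Int Int).insert 0 1)).keys.foldl
      (fun result s =>
        PySem.Int.mod (result + PySem.Int.powMod s k.toNat 998244353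
          * (nums.foldl aStep ((PySem.Dict.empty : PySem.Dict Int Int).insert 0 1)).getD s 0)
          998244353) 0
    = _
  have hf : (fun (result s : Int) =>
        PySem.Int.mod (result + PySem.Int.powMod s k.toNat 998244353
          * (nums.foldl aStep ((PySem.Dict.empty : PySem.Dict Int Int).insert 0 1)).getD s 0)
          998244353)
      = (fun result s =>
        (result + PySem.Int.powMod s k.toNat 998244353
          * (nums.foldl aStep ((PySem.Dict.empty : PySem.Dict Int Int).insert 0 1)).getD s 0)
          % 998244353) := by
    funext r s
    rw [PySem.Int.mod_eq_emod_of_pos (by norm_num)]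
  rw [hf]
  have hm := modfold 998244353
    (fun s => PySem.Int.powMod s k.toNat 998244353
      * (nums.foldl aStep ((PySem.Dict.empty : PySem.Dict Int Int).insert 0 1)).getD s 0)
    (nums.foldl aStep ((PySem.Dict.empty : PySem.Dict Int Int).insert 0 1)).keys 0
  rw [show ((0 : Int) % 998244353) = 0 by decide, zero_add] at hm
  rw [hm]
  congr 1
  exact congrArg List.sum (List.map_congr_left (fun s _ => by rw [A_dict_getD nums s]))

-- B's recursion computes the sum of powMod over all subset sums shifted by acc
lemma bGo_eq (k : Int) : ∀ (l : List Int) (acc : Int),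
    bGo k l acc
      = ((ssList l).map (fun s => PySem.Int.powMod (acc + s) k.toNat 998244353)).sum
          % 998244353 := by
  intro l
  induction l with
  | nil =>
    intro acc
    show PySem.Int.powMod acc k.toNat 998244353 = _
    simp only [ssList, List.map_cons, List.map_nil, List.sum_cons, List.sum_nil,
      add_zero]
    rw [Int.emod_eq_of_lt (PySem.Int.powMod_nonneg _ _ (by norm_num))
      (PySem.Int.powMod_lt _ _ (by norm_num))]
  | cons x l ih =>
    intro acc
    show PySem.Int.mod (bGo k l acc + bGo k l (acc + x)) 998244353 = _
    rw [PySem.Int.mod_eq_emod_of_pos (by norm_num), ih acc, ih (acc + x),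
      Int.emod_add_emod, Int.add_emod_emod]
    show _ = (((ssList l ++ (ssList l).map (· + x)).map
        (fun s => PySem.Int.powMod (acc + s) k.toNat 998244353)).sum) % 998244353
    rw [List.map_append, List.sum_append, List.map_map]
    congr 1
    congr 1
    refine congrArg (fun t : List Int => t.sum) (List.map_congr_left fun s _ => ?_)
    simp only [Function.comp_apply]
    ring_nf

lemma B_val (nums : List Int) (n k : Int) :
    subsetSums_alt nums n k
      = ((ssList nums).map (fun s => PySem.Int.powMod s k.toNat 998244353)).sum
          % 998244353 := by
  show bGo k nums 0 = _
  rw [bGo_eq k nums 0]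
  congr 1
  exact congrArg List.sum (List.map_congr_left (fun s _ => by rw [zero_add]))

-- ===== VERDICT (by name: the statement is the Claim_ definition above) =====
theorem subsetSums_spec : Claim_equal_subsetSums := by
  intro nums n k _ _
  show subsetSums nums n k = subsetSums_alt nums n k
  rw [A_val nums n k, B_val nums n k]
  congr 1
  exact final_sum_eq _ (aLoop_nodup nums _ d0_nodup) nums
    (fun t ht => mem_keys_of_getD_ne _ t
      (by rw [A_dict_getD nums t]; exact cnt_mem_ne nums t ht)) _
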